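-- pv_equiv track=rewrite | github.com/rrossinni-exelixis/openstudybuilder-solution | clinical-mdr-api/clinical_mdr_api/services/_utils.py | build_simple_filters
-- ===== SOURCE A (Python) =====
-- from typing import AbstractSet, Any, Callable, Mapping, MutableMapping, Self, TypeVar
--
-- def build_simple_filters(
--     _vo_to_ar_filter_map: dict[Any, Any],
--     filter_by: dict[Any, Any] | None,
--     sort_by: dict[Any, Any] | None,
-- ) -> dict[Any, Any] | None:
--     if (
--         filter_by is None
--         or all(key in _vo_to_ar_filter_map.keys() for key in filter_by.keys())
--     ) and (
--         sort_by is None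
--         or all(key in _vo_to_ar_filter_map.keys() for key in sort_by.keys())
--     ):
--         if filter_by is not None:
--             simple_filter_by = {
--                 _vo_to_ar_filter_map[key]: value for key, value in filter_by.items()
--             }
--         else:
--             simple_filter_by = None
--         if sort_by is not None:
--             simple_sort_by = {
--                 _vo_to_ar_filter_map[key]: value for key, value in sort_by.items()
--             }
--         else:
--             simple_sort_by = None
--         return {"filter_by": simple_filter_by, "sort_by": simple_sort_by}
--     return None
-- ===== SOURCE B (Python) =====
-- def build_simple_filters(_vo_to_ar_filter_map, filter_by, sort_by):
--     results = []
--     for d in (filter_by, sort_by):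
--         if d is None:
--             results.append(None)
--             continue
--         mapped = {}
--         for key, value in d.items():
--             if key not in _vo_to_ar_filter_map:
--                 return None
--             mapped[_vo_to_ar_filter_map[key]] = value
--         results.append(mapped)
--     return {"filter_by": results[0], "sort_by": results[1]}
-- ===== Notes on version B (the rewrite author's own statement) =====
-- stated objective: alternative
-- what changed: Replaces A's staged design (two upfront all-keys-in-map validation scans, then two dict comprehensions) by one fused flat pass: an outer loop over the (filter_by, sort_by) pair accumulates results incrementally, checking each key and inserting its remapped entry in the same step, with an early return None from inside the loop on the first missing key.
import Mathlib
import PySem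

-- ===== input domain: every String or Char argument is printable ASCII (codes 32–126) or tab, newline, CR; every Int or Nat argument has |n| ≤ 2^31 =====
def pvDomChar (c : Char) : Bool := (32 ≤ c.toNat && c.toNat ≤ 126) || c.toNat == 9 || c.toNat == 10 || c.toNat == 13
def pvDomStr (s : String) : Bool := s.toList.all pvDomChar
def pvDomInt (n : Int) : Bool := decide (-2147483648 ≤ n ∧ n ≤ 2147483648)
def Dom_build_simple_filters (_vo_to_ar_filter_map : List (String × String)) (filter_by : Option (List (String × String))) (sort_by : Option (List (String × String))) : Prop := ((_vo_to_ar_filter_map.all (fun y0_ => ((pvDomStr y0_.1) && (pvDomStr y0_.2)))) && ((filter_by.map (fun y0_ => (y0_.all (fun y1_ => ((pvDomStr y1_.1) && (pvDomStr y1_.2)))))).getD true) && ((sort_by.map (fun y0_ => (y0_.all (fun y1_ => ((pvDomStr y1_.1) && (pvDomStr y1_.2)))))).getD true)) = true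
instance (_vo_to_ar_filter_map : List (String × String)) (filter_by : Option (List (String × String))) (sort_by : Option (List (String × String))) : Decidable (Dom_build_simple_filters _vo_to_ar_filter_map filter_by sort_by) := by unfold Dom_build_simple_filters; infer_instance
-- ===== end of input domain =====

-- B fuses A's staged validate-then-comprehend design into one flat pass over the
-- (filter_by, sort_by) pair, checking and remapping each key in the same loop step
-- with an early abort on the first missing key; objective: alternative decomposition.

-- ===== PORT A =====
-- {_vo_to_ar_filter_map[key]: value for key, value in d.items()} — the guard in
-- build_simple_filters guarantees every key is present, so the `.getD ""` default is unreachable.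
def pvRemapA (md : PySem.Dict String String) (d : List (String × String)) : List (String × String) :=
  (d.foldl (fun acc kv => acc.insert (md.getD kv.1 "") kv.2) PySem.Dict.empty).items

def build_simple_filters (_vo_to_ar_filter_map : List (String × String)) (filter_by : Option (List (String × String))) (sort_by : Option (List (String × String))) : Option (List (String × Option (List (String × String)))) :=
  let md := PySem.Dict.ofList _vo_to_ar_filter_map
  if ((match filter_by with
       | none => true
       | some d => d.all (fun kv => md.contains kv.1))
      &&
      (match sort_by with
       | none => true
       | some d => d.all (fun kv => md.contains kv.1))) then
    some [("filter_by", filter_by.map (pvRemapA md)),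
          ("sort_by", sort_by.map (pvRemapA md))]
  else
    none

-- ===== PORT B =====
-- B's inner loop: `for key, value in d.items(): if key not in map: return None;
-- mapped[map[key]] = value` — structural recursion over d with the `mapped` accumulator,
-- `none` = the early `return None`.
def pvInnerB (md : PySem.Dict String String) : List (String × String) → PySem.Dict String String → Option (PySem.Dict String String)
  | [], mapped => some mapped
  | kv :: tl, mapped =>
    match md.get? kv.1 with
    | none => none
    | some mk => pvInnerB md tl (mapped.insert mk kv.2)

-- B's outer loop over (filter_by, sort_by): appends `none` for None, else the inner
-- loop's result; a `none` from the inner loop aborts the whole computation.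
def pvOuterB (md : PySem.Dict String String) (st : Option (List (Option (List (String × String))))) (d : Option (List (String × String))) : Option (List (Option (List (String × String)))) :=
  st.bind fun results =>
    match d with
    | none => some (results ++ [none])
    | some d => (pvInnerB md d PySem.Dict.empty).map (fun mp => results ++ [some mp.items])

def build_simple_filters_alt (_vo_to_ar_filter_map : List (String × String)) (filter_by : Option (List (String × String))) (sort_by : Option (List (String × String))) : Option (List (String × Option (List (String × String)))) :=
  let md := PySem.Dict.ofList _vo_to_ar_filter_map
  match [filter_by, sort_by].foldl (pvOuterB md) (some []) with
  | some [f, s] => some [("filter_by", f), ("sort_by", s)]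
  | _ => none

-- ===== PRECONDITION & SPEC =====
def Spec_build_simple_filters (_vo_to_ar_filter_map : List (String × String)) (filter_by : Option (List (String × String))) (sort_by : Option (List (String × String))) (out : Option (List (String × Option (List (String × String))))) : Prop := out = build_simple_filters_alt _vo_to_ar_filter_map filter_by sort_by
instance (_vo_to_ar_filter_map : List (String × String)) (filter_by : Option (List (String × String))) (sort_by : Option (List (String × String))) (out : Option (List (String × Option (List (String × String))))) : Decidable (Spec_build_simple_filters _vo_to_ar_filter_map filter_by sort_by out) := by unfold Spec_build_simple_filters; infer_instance

-- ===== CLAIM (what is proved, stated in full; the proofs are below) =====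
def Claim_equal_build_simple_filters : Prop := ∀ (_vo_to_ar_filter_map : List (String × String)) (filter_by : Option (List (String × String))) (sort_by : Option (List (String × String))), Dom_build_simple_filters _vo_to_ar_filter_map filter_by sort_by → Spec_build_simple_filters _vo_to_ar_filter_map filter_by sort_by (build_simple_filters _vo_to_ar_filter_map filter_by sort_by)

-- ===== LEMMAS AND PROOFS =====

-- B's fused inner loop equals "validate all keys, then remap", for any accumulator
theorem pvInnerB_eq (md : PySem.Dict String String) (d : List (String × String)) (acc : PySem.Dict String String) :
    pvInnerB md d acc
    = if d.all (fun kv => md.contains kv.1) then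
        some (d.foldl (fun acc kv => acc.insert (md.getD kv.1 "") kv.2) acc)
      else none := by
  induction d generalizing acc with
  | nil => rfl
  | cons kv tl ih =>
    cases h : md.get? kv.1 with
    | none =>
      have hc : md.contains kv.1 = false := by
        rw [PySem.Dict.contains_eq_isSome_get?, h]; rfl
      simp [pvInnerB, h, hc, List.all_cons]
    | some mk =>
      have hc : md.contains kv.1 = true := by
        rw [PySem.Dict.contains_eq_isSome_get?, h]; rfl
      simp only [pvInnerB, h, ih, List.all_cons, hc, Bool.true_and, List.foldl_cons,
        PySem.Dict.getD_eq_get?_getD, Option.getD_some]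

-- ===== VERDICT (by name: the statement is the Claim_ definition above) =====
theorem build_simple_filters_spec : Claim_equal_build_simple_filters := by
  intro m fb sb _dom
  unfold Spec_build_simple_filters build_simple_filters build_simple_filters_alt
  cases fb with
  | none =>
    cases sb with
    | none => rfl
    | some ds =>
      simp only [List.foldl, pvOuterB, Option.bind_some, pvInnerB_eq]
      by_cases hs : ds.all (fun kv => (PySem.Dict.ofList m).contains kv.1) = true <;>
        simp [hs, pvRemapA]
  | some df =>
    cases sb with
    | none =>
      simp only [List.foldl, pvOuterB, Option.bind_some, pvInnerB_eq]
      by_cases hf : df.all (fun kv => (PySem.Dict.ofList m).contains kv.1) = true <;>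
        simp [hf, pvRemapA]
    | some ds =>
      simp only [List.foldl, pvOuterB, Option.bind_some, pvInnerB_eq]
      by_cases hf : df.all (fun kv => (PySem.Dict.ofList m).contains kv.1) = true <;>
      by_cases hs : ds.all (fun kv => (PySem.Dict.ofList m).contains kv.1) = true <;>
        simp [hf, hs, pvRemapA]
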